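-- pv_equiv track=rewrite | github.com/rob3315/set | test_bitmap.py | creer_image
-- ===== SOURCE A (Python) =====
-- v=1
--
-- def creer_image(n,e,r):
--     l=[]
--     for i in range(n):
--         for j in range(n):
--             if ((i+j)%n)<e:
--                 l.append(v)
--             else:
--                 l.append(0)
--     return l
-- ===== SOURCE B (Python) =====
-- v=1
--
-- def creer_image(n,e,r):
--     row0 = [v if k < e else 0 for k in range(n)]
--     l = []
--     for i in range(n):
--         l += row0[i:] + row0[:i]
--     return l
-- ===== Notes on version B (the rewrite author's own statement) =====
-- stated objective: alternative
-- what changed: B precomputes the base row once and builds each of the n rows as a rotation (slice concatenation row0[i:]+row0[:i]) of it, exploiting the circulant structure instead of evaluating the ((i+j)%n)<e predicate for every one of the n^2 cells.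
import Mathlib
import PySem

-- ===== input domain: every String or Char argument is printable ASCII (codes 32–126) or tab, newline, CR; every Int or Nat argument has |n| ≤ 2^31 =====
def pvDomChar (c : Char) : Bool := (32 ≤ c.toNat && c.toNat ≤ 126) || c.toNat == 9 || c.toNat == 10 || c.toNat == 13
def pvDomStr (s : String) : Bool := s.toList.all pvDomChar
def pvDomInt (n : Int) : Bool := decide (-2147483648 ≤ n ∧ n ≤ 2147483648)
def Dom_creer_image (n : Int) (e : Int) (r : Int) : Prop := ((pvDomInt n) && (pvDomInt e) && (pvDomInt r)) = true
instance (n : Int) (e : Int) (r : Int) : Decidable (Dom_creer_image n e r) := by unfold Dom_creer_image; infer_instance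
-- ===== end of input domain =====

-- B exploits the circulant structure: one precomputed base row, each output row a rotation of it (alternative decomposition; same asymptotic cost).

-- ===== PORT A =====
-- literal port of A: nested loops over range(n), per-cell modulo test, append v(=1) or 0
def creer_image (n : Int) (e : Int) (r : Int) : List Int :=
  (PySem.List.pyRange 0 n 1).foldl (fun l i =>
    (PySem.List.pyRange 0 n 1).foldl (fun l j =>
      if PySem.Int.mod (i + j) n < e then l ++ [(1 : Int)] else l ++ [(0 : Int)]) l) []

-- ===== PORT B =====
-- literal port of B: base row once, then l += row0[i:] + row0[:i] for each i
def creer_image_alt (n : Int) (e : Int) (r : Int) : List Int :=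
  let row0 := (PySem.List.pyRange 0 n 1).map (fun k => if k < e then (1 : Int) else 0)
  (PySem.List.pyRange 0 n 1).foldl (fun l i =>
    l ++ (PySem.List.slice row0 (some i) none ++ PySem.List.slice row0 none (some i))) []

-- ===== PRECONDITION & SPEC =====
def Spec_creer_image (n : Int) (e : Int) (r : Int) (out : List Int) : Prop := out = creer_image_alt n e r
instance (n : Int) (e : Int) (r : Int) (out : List Int) : Decidable (Spec_creer_image n e r out) := by unfold Spec_creer_image; infer_instance

-- ===== CLAIM (what is proved, stated in full; the proofs are below) =====
def Claim_equal_creer_image : Prop := ∀ (n : Int) (e : Int) (r : Int), Dom_creer_image n e r → Spec_creer_image n e r (creer_image n e r)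

-- ===== LEMMAS AND PROOFS =====

-- A's inner loop builds one image row: it appends the map of the per-cell test over range(n)
theorem pv_inner_row (n e i : Int) (l : List Int) :
    (PySem.List.pyRange 0 n 1).foldl (fun l j =>
      if PySem.Int.mod (i + j) n < e then l ++ [(1 : Int)] else l ++ [(0 : Int)]) l
    = l ++ (PySem.List.pyRange 0 n 1).map
        (fun j => if PySem.Int.mod (i + j) n < e then (1 : Int) else 0) := by
  have h : ∀ (l : List Int) (j : Int),
      (if PySem.Int.mod (i + j) n < e then l ++ [(1 : Int)] else l ++ [(0 : Int)])
      = l ++ [if PySem.Int.mod (i + j) n < e then (1 : Int) else 0] := by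
    intro l j; split <;> rfl
  calc (PySem.List.pyRange 0 n 1).foldl (fun l j =>
          if PySem.Int.mod (i + j) n < e then l ++ [(1 : Int)] else l ++ [(0 : Int)]) l
      = (PySem.List.pyRange 0 n 1).foldl (fun l j =>
          l ++ [if PySem.Int.mod (i + j) n < e then (1 : Int) else 0]) l := by
        exact PySem.List.foldl_congr_mem _ _ _ _ (by intro acc x _; exact h acc x)
    _ = _ := PySem.List.foldl_append_singleton_eq_map _ _ _

-- per-row equality: for 0 ≤ i < n, A's i-th row equals the rotation of B's base row
theorem pv_row_eq (n e i : Int) (hi0 : 0 ≤ i) (hin : i < n) :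
    (PySem.List.pyRange 0 n 1).map
        (fun j => if PySem.Int.mod (i + j) n < e then (1 : Int) else 0)
    = PySem.List.slice ((PySem.List.pyRange 0 n 1).map (fun k => if k < e then (1 : Int) else 0)) (some i) none
      ++ PySem.List.slice ((PySem.List.pyRange 0 n 1).map (fun k => if k < e then (1 : Int) else 0)) none (some i) := by
  set row0 := (PySem.List.pyRange 0 n 1).map (fun k => if k < e then (1 : Int) else 0) with hrow0
  have hn : 0 < n := lt_of_le_of_lt hi0 hin
  have hlen0 : row0.length = n.toNat := by
    simp [hrow0, PySem.List.length_pyRange_one]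
  have hIle : i.toNat ≤ row0.length := by
    rw [hlen0]; omega
  rw [PySem.List.slice_from row0 hi0, PySem.List.slice_to row0 hi0,
      ← List.rotate_eq_drop_append_take hIle]
  apply List.ext_getElem
  · simp [List.length_map, PySem.List.length_pyRange_one, hlen0]
  · intro j h1 h2
    have hjlen : j < n.toNat := by
      simpa [PySem.List.length_pyRange_one] using h1
    have hmodlt : (j + i.toNat) % row0.length < row0.length := by
      apply Nat.mod_lt; omega
    rw [List.getElem_rotate, List.getElem_map, List.getElem_map,
        PySem.List.getElem_pyRange_one, PySem.List.getElem_pyRange_one]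
    have hmod : PySem.Int.mod (i + ((0 : Int) + j)) n
        = (0 : Int) + (((j + i.toNat) % row0.length : Nat) : Int) := by
      rw [PySem.Int.mod_eq_emod_of_pos hn, hlen0]
      have ha : (i + ((0:Int) + j)) = ((j + i.toNat : Nat) : Int) := by push_cast; omega
      have hb : (n : Int) = ((n.toNat : Nat) : Int) := by omega
      rw [ha, hb, Int.natCast_emod]
      simp
    rw [hmod]

-- ===== VERDICT (by name: the statement is the Claim_ definition above) =====
theorem creer_image_spec : Claim_equal_creer_image := by
  intro n e r _
  unfold Spec_creer_image creer_image creer_image_alt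
  simp only [pv_inner_row]
  rw [PySem.List.foldl_append_eq_flatMap, PySem.List.foldl_append_eq_flatMap]
  congr 1
  apply List.flatMap_congr
  intro i hi
  rw [PySem.List.mem_pyRange_one] at hi
  exact pv_row_eq n e i hi.1 hi.2
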